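-- pv_equiv track=rewrite | github.com/geodome/sussmods | ICT133/2025S1/solution.py | deductWords2
-- ===== SOURCE A (Python) =====
-- def deductWords2(word1:str, word2:str) -> list[str]:
--     """
--     Advanced solution for 3a, with log-linear time complexity. The bottleneck is sorting the words
--     into alphabetical order, with log-linear time complexity; but the filtering process of removing
--     letters of the 2nd word from the 1st word has linear time complexity.
--     """
--     # sort each word
--     # Python uses Tim Sort with log linear time complexity
--     w1 = sorted(word1)
--     w2 = sorted(word2)
--     # begin filtering
--     filtered = []
--     p1, p2 = 0, 0
--     while p1 < len(w1) and p2 < len(w2):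
--         if w1[p1] < w2[p2]:
--             while p1 < len(w1) and w1[p1] < w2[p2]:
--                 filtered.append(w1[p1])
--                 p1 += 1
--         elif w1[p1] > w2[p2]:
--             while p2 < len(w2) and w1[p1] > w2[p2]:
--                 p2 += 1
--         else:
--             d = w2[p2]
--             while p1 < len(w1) and w1[p1] == d:
--                 p1 += 1
--             while p2 < len(w2) and w2[p2] == d:
--                 p2 += 1
--     # append remaining unfiltered letters in w1
--     if p1 < len(w1):
--         for c in w1[p1:]:
--             filtered.append(c)
--     return filtered
-- ===== SOURCE B (Python) =====
-- def deductWords2(word1: str, word2: str) -> list[str]: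
--     banned = set(word2)
--     return sorted(c for c in word1 if c not in banned)
-- ===== Notes on version B (the rewrite author's own statement) =====
-- stated objective: simpler
-- what changed: Replaces A's sort-both-words-then-two-pointer-merge filter (outer while with three nested inner whiles) by a one-line set-membership filter of word1 followed by a single sort of the remainder (word2 is not sorted at all).
import Mathlib
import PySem

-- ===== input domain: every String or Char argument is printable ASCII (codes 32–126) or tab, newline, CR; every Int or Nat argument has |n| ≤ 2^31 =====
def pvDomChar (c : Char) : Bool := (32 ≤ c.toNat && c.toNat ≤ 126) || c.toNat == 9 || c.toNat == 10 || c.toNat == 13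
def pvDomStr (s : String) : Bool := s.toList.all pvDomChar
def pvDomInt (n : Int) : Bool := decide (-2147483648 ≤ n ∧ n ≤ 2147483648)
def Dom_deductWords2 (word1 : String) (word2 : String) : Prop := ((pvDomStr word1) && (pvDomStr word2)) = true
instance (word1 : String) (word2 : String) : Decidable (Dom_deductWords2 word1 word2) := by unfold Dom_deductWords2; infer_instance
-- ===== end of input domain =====

-- B replaces A's sort-both-then-two-pointer-merge by a set-membership filter of word1 plus one sort (simpler).
-- Both ports work over List Char and map to singleton strings at return: Python compares length-1 strings,
-- whose order coincides with Char (codepoint) order, so the char-level port is exact.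


-- ===== PORT A =====
-- The while loops are ported with an explicit fuel argument (always supplied large enough: each inner
-- loop advances its index by at least 1 per step, so length-sized fuel suffices); the loop bodies are
-- otherwise step-for-step transcriptions of A's code.

-- inner loop 1: "while p1 < len(w1) and w1[p1] < w2[p2]: filtered.append(w1[p1]); p1 += 1"  (d = w2[p2], fixed)
def aAppendLt (w1 : List Char) (d : Char) : Nat → Nat → List Char → Nat × List Char
  | 0, p1, acc => (p1, acc)
  | fuel + 1, p1, acc =>
    if p1 < w1.length ∧ w1.getD p1 ' ' < d then
      aAppendLt w1 d fuel (p1 + 1) (acc ++ [w1.getD p1 ' '])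
    else (p1, acc)

-- inner loop 2: "while p2 < len(w2) and w1[p1] > w2[p2]: p2 += 1"  (c = w1[p1], fixed)
def aSkipLt (w2 : List Char) (c : Char) : Nat → Nat → Nat
  | 0, p2 => p2
  | fuel + 1, p2 =>
    if p2 < w2.length ∧ w2.getD p2 ' ' < c then aSkipLt w2 c fuel (p2 + 1) else p2

-- inner loops 3/4: "while p < len(w) and w[p] == d: p += 1"
def aSkipEq (w : List Char) (d : Char) : Nat → Nat → Nat
  | 0, p => p
  | fuel + 1, p =>
    if p < w.length ∧ w.getD p ' ' == d then aSkipEq w d fuel (p + 1) else p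

-- outer loop of A, state (p1, p2, filtered); the trailing "append remaining letters" is the exit branch
def aOuter (w1 w2 : List Char) : Nat → Nat → Nat → List Char → List Char
  | 0, p1, _, acc => if p1 < w1.length then acc ++ w1.drop p1 else acc
  | fuel + 1, p1, p2, acc =>
    if p1 < w1.length ∧ p2 < w2.length then
      if w1.getD p1 ' ' < w2.getD p2 ' ' then
        let r := aAppendLt w1 (w2.getD p2 ' ') (w1.length + 1) p1 acc
        aOuter w1 w2 fuel r.1 p2 r.2
      else if w2.getD p2 ' ' < w1.getD p1 ' ' then
        aOuter w1 w2 fuel p1 (aSkipLt w2 (w1.getD p1 ' ') (w2.length + 1) p2) acc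
      else
        let d := w2.getD p2 ' '
        aOuter w1 w2 fuel (aSkipEq w1 d (w1.length + 1) p1) (aSkipEq w2 d (w2.length + 1) p2) acc
    else
      if p1 < w1.length then acc ++ w1.drop p1 else acc

def deductWords2 (word1 : String) (word2 : String) : List String :=
  let w1 := PySem.List.sorted word1.toList (fun c => c) false
  let w2 := PySem.List.sorted word2.toList (fun c => c) false
  (aOuter w1 w2 (w1.length + w2.length + 1) 0 0 []).map (fun c => String.ofList [c])

-- ===== PORT B =====
def deductWords2_alt (word1 : String) (word2 : String) : List String :=
  let banned : PySem.Set Char := PySem.Set.ofList word2.toList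
  (PySem.List.sorted (word1.toList.filter (fun c => !(PySem.Set.contains banned c))) (fun c => c) false).map
    (fun c => String.ofList [c])

-- ===== PRECONDITION & SPEC =====
def Spec_deductWords2 (word1 : String) (word2 : String) (out : List String) : Prop := out = deductWords2_alt word1 word2
instance (word1 : String) (word2 : String) (out : List String) : Decidable (Spec_deductWords2 word1 word2 out) := by unfold Spec_deductWords2; infer_instance

-- ===== CLAIM (what is proved, stated in full; the proofs are below) =====
def Claim_equal_deductWords2 : Prop := ∀ (word1 : String) (word2 : String), Dom_deductWords2 word1 word2 → Spec_deductWords2 word1 word2 (deductWords2 word1 word2)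

-- ===== LEMMAS AND PROOFS =====

theorem notContains_of_forall_ne (v : List Char) (c : Char) (h : ∀ z ∈ v, z ≠ c) : v.contains c = false := by
  by_contra hc
  exact h c (List.contains_iff_mem.mp (by simpa using hc)) rfl

theorem forall_head_le (l : List Char) (p : Nat) (hp : p < l.length)
    (h : (l.drop p).Pairwise (· ≤ ·)) : ∀ z ∈ l.drop p, l[p] ≤ z := by
  rw [List.drop_eq_getElem_cons hp] at h
  intro z hz
  rw [List.drop_eq_getElem_cons hp] at hz
  rcases List.mem_cons.mp hz with rfl | hzt
  · exact le_refl _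
  · exact List.rel_of_pairwise_cons h hzt

theorem gt_of_mem_dropWhile_eq (d : Char) : ∀ (l : List Char), l.Pairwise (· ≤ ·) → (∀ z ∈ l, d ≤ z) →
    ∀ c ∈ l.dropWhile (fun z => z == d), d < c := by
  intro l
  induction l with
  | nil => simp
  | cons a t ih =>
    intro hp hge c hc
    by_cases ha : (a == d) = true
    · rw [List.dropWhile_cons_of_pos (p := fun z => z == d) ha] at hc
      exact ih hp.of_cons (fun z hz => hge z (List.mem_cons_of_mem _ hz)) c hc
    · rw [List.dropWhile_cons_of_neg (p := fun z => z == d) ha] at hc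
      have hda : d < a :=
        lt_of_le_of_ne (hge a (List.mem_cons_self ..)) (fun hh => ha (by simp [hh.symm]))
      rcases List.mem_cons.mp hc with rfl | hct
      · exact hda
      · exact lt_of_lt_of_le hda (List.rel_of_pairwise_cons hp hct)

theorem drop_past_takeWhile (l : List Char) (p : Nat) (pred : Char → Bool) :
    l.drop (p + ((l.drop p).takeWhile pred).length) = (l.drop p).dropWhile pred := by
  have h := List.drop_left (l₁ := (l.drop p).takeWhile pred) (l₂ := (l.drop p).dropWhile pred)
  rw [List.takeWhile_append_dropWhile] at h
  rw [← h, List.drop_drop]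

theorem filter_split (P pred : Char → Bool) (u : List Char) :
    u.filter P = (u.takeWhile pred).filter P ++ (u.dropWhile pred).filter P := by
  conv_lhs => rw [← List.takeWhile_append_dropWhile (p := pred) (l := u)]
  rw [List.filter_append]

theorem contains_dropWhile_eq (v : List Char) (pred : Char → Bool) (c : Char)
    (h : ∀ z ∈ v.takeWhile pred, z ≠ c) :
    (v.dropWhile pred).contains c = v.contains c := by
  conv_rhs => rw [← List.takeWhile_append_dropWhile (p := pred) (l := v)]
  rw [List.contains_append, notContains_of_forall_ne _ _ h]
  simp

theorem aAppendLt_spec (w1 : List Char) (d : Char) : ∀ fuel p1 acc, w1.length - p1 ≤ fuel →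
    aAppendLt w1 d fuel p1 acc =
      (p1 + ((w1.drop p1).takeWhile (fun c => decide (c < d))).length,
       acc ++ (w1.drop p1).takeWhile (fun c => decide (c < d))) := by
  intro fuel
  induction fuel with
  | zero =>
    intro p1 acc hf
    rw [aAppendLt, List.drop_eq_nil_of_le (by omega)]
    simp
  | succ n ih =>
    intro p1 acc hf
    by_cases hp : p1 < w1.length
    · have hgd : w1.getD p1 ' ' = w1[p1] := List.getD_eq_getElem w1 ' ' hp
      by_cases hc : w1[p1] < d
      · rw [aAppendLt, if_pos ⟨hp, by rw [hgd]; exact hc⟩, ih (p1 + 1) _ (by omega)]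
        rw [List.drop_eq_getElem_cons hp,
          List.takeWhile_cons_of_pos (p := fun c => decide (c < d)) (by simpa using hc)]
        simp only [Prod.mk.injEq, List.length_cons, hgd, List.append_assoc, List.singleton_append]
        exact ⟨by omega, by simp⟩
      · rw [aAppendLt, if_neg (fun hh => hc (by rw [← hgd]; exact hh.2))]
        rw [List.drop_eq_getElem_cons hp,
          List.takeWhile_cons_of_neg (p := fun c => decide (c < d)) (by simpa using hc)]
        simp
    · rw [aAppendLt, if_neg (fun hh => hp hh.1), List.drop_eq_nil_of_le (by omega)]
      simp

theorem aSkipLt_spec (w2 : List Char) (c : Char) : ∀ fuel p2, w2.length - p2 ≤ fuel →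
    aSkipLt w2 c fuel p2 = p2 + ((w2.drop p2).takeWhile (fun z => decide (z < c))).length := by
  intro fuel
  induction fuel with
  | zero =>
    intro p2 hf
    rw [aSkipLt, List.drop_eq_nil_of_le (by omega)]
    simp
  | succ n ih =>
    intro p2 hf
    by_cases hp : p2 < w2.length
    · have hgd : w2.getD p2 ' ' = w2[p2] := List.getD_eq_getElem w2 ' ' hp
      by_cases hc : w2[p2] < c
      · rw [aSkipLt, if_pos ⟨hp, by rw [hgd]; exact hc⟩, ih (p2 + 1) (by omega)]
        rw [List.drop_eq_getElem_cons hp,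
          List.takeWhile_cons_of_pos (p := fun z => decide (z < c)) (by simpa using hc)]
        simp
        omega
      · rw [aSkipLt, if_neg (fun hh => hc (by rw [← hgd]; exact hh.2))]
        rw [List.drop_eq_getElem_cons hp,
          List.takeWhile_cons_of_neg (p := fun z => decide (z < c)) (by simpa using hc)]
        simp
    · rw [aSkipLt, if_neg (fun hh => hp hh.1), List.drop_eq_nil_of_le (by omega)]
      simp

theorem aSkipEq_spec (w : List Char) (d : Char) : ∀ fuel p, w.length - p ≤ fuel →
    aSkipEq w d fuel p = p + ((w.drop p).takeWhile (fun z => z == d)).length := by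
  intro fuel
  induction fuel with
  | zero =>
    intro p hf
    rw [aSkipEq, List.drop_eq_nil_of_le (by omega)]
    simp
  | succ n ih =>
    intro p hf
    by_cases hp : p < w.length
    · have hgd : w.getD p ' ' = w[p] := List.getD_eq_getElem w ' ' hp
      by_cases hc : (w[p] == d) = true
      · rw [aSkipEq, if_pos ⟨hp, by rw [hgd]; exact hc⟩, ih (p + 1) (by omega)]
        rw [List.drop_eq_getElem_cons hp,
          List.takeWhile_cons_of_pos (p := fun z => z == d) hc]
        simp
        omega
      · rw [aSkipEq, if_neg (fun hh => hc (by rw [← hgd]; exact hh.2))]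
        rw [List.drop_eq_getElem_cons hp,
          List.takeWhile_cons_of_neg (p := fun z => z == d) hc]
        simp
    · rw [aSkipEq, if_neg (fun hh => hp hh.1), List.drop_eq_nil_of_le (by omega)]
      simp

theorem contains_sorted_eq_contains_ofList (l2 : List Char) (c : Char) :
    (PySem.List.sorted l2 (fun c => c) false).contains c = (PySem.Set.ofList l2).contains c := by
  rw [PySem.Set.contains_eq_listContains]
  rw [Bool.eq_iff_iff]
  simp only [List.contains_iff_mem, PySem.List.mem_sorted, PySem.Set.mem_ofList]

theorem aOuter_filter (w1 w2 : List Char) (h1 : w1.Pairwise (· ≤ ·)) (h2 : w2.Pairwise (· ≤ ·)) :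
    ∀ fuel p1 p2 acc, (w1.length - p1) + (w2.length - p2) ≤ fuel →
      aOuter w1 w2 fuel p1 p2 acc = acc ++ (w1.drop p1).filter (fun c => !((w2.drop p2).contains c)) := by
  intro fuel
  induction fuel with
  | zero =>
    intro p1 p2 acc hm
    have hl1 : w1.length ≤ p1 := by omega
    rw [aOuter, if_neg (by omega), List.drop_eq_nil_of_le hl1]
    simp
  | succ n ih =>
    intro p1 p2 acc hm
    rw [aOuter]
    by_cases hg : p1 < w1.length ∧ p2 < w2.length
    · rw [if_pos hg]
      obtain ⟨hp1, hp2⟩ := hg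
      have hd1 := List.drop_eq_getElem_cons hp1
      have hd2 := List.drop_eq_getElem_cons hp2
      have hu : (w1.drop p1).Pairwise (· ≤ ·) := h1.drop
      have hv : (w2.drop p2).Pairwise (· ≤ ·) := h2.drop
      rw [List.getD_eq_getElem w1 ' ' hp1, List.getD_eq_getElem w2 ' ' hp2]
      by_cases hlt : w1[p1] < w2[p2]
      · rw [if_pos hlt]
        show aOuter w1 w2 n (aAppendLt w1 (w2[p2]) (w1.length + 1) p1 acc).1 p2
          (aAppendLt w1 (w2[p2]) (w1.length + 1) p1 acc).2 = _
        rw [aAppendLt_spec w1 (w2[p2]) (w1.length + 1) p1 acc (by omega)]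
        dsimp only
        have htlen : 1 ≤ ((w1.drop p1).takeWhile (fun c => decide (c < w2[p2]))).length := by
          rw [hd1,
            List.takeWhile_cons_of_pos (p := fun c => decide (c < w2[p2])) (by simpa using hlt)]
          simp
        rw [ih (p1 + ((w1.drop p1).takeWhile (fun c => decide (c < w2[p2]))).length) p2
          (acc ++ (w1.drop p1).takeWhile (fun c => decide (c < w2[p2]))) (by omega),
          drop_past_takeWhile]
        rw [filter_split (fun c => !((w2.drop p2).contains c)) (fun c => decide (c < w2[p2]))
          (w1.drop p1)]
        have hft : ((w1.drop p1).takeWhile (fun c => decide (c < w2[p2]))).filter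
            (fun c => !((w2.drop p2).contains c)) =
            (w1.drop p1).takeWhile (fun c => decide (c < w2[p2])) := by
          rw [List.filter_eq_self]
          intro c hc
          have hcy : c < w2[p2] := by simpa using List.mem_takeWhile_imp hc
          have hn : (w2.drop p2).contains c = false :=
            notContains_of_forall_ne _ _
              (fun z hz => (lt_of_lt_of_le hcy (forall_head_le w2 p2 hp2 hv z hz)).ne')
          show (!(List.drop p2 w2).contains c) = true
          rw [hn]
          rfl
        rw [hft, List.append_assoc]
      · rw [if_neg hlt]
        by_cases hgt : w2[p2] < w1[p1]
        · rw [if_pos hgt, aSkipLt_spec w2 (w1[p1]) (w2.length + 1) p2 (by omega)]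
          have htvlen : 1 ≤ ((w2.drop p2).takeWhile (fun z => decide (z < w1[p1]))).length := by
            rw [hd2,
              List.takeWhile_cons_of_pos (p := fun z => decide (z < w1[p1])) (by simpa using hgt)]
            simp
          rw [ih p1 (p2 + ((w2.drop p2).takeWhile (fun z => decide (z < w1[p1]))).length) acc
            (by omega), drop_past_takeWhile]
          congr 1
          apply List.filter_congr
          intro c hc
          dsimp only
          have hxc : w1[p1] ≤ c := forall_head_le w1 p1 hp1 hu c hc
          rw [contains_dropWhile_eq _ _ _ (fun z hz =>
            ne_of_lt (lt_of_lt_of_le (by simpa using List.mem_takeWhile_imp hz) hxc))]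
        · rw [if_neg hgt]
          have heq : w1[p1] = w2[p2] := le_antisymm (not_lt.mp hgt) (not_lt.mp hlt)
          show aOuter w1 w2 n (aSkipEq w1 (w2[p2]) (w1.length + 1) p1)
            (aSkipEq w2 (w2[p2]) (w2.length + 1) p2) acc = _
          rw [aSkipEq_spec w1 (w2[p2]) (w1.length + 1) p1 (by omega),
            aSkipEq_spec w2 (w2[p2]) (w2.length + 1) p2 (by omega)]
          have h1len : 1 ≤ ((w1.drop p1).takeWhile (fun z => z == w2[p2])).length := by
            rw [hd1, List.takeWhile_cons_of_pos (p := fun z => z == w2[p2]) (by simp [heq])]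
            simp
          have h2len : 1 ≤ ((w2.drop p2).takeWhile (fun z => z == w2[p2])).length := by
            rw [hd2, List.takeWhile_cons_of_pos (p := fun z => z == w2[p2]) (by simp)]
            simp
          rw [ih (p1 + ((w1.drop p1).takeWhile (fun z => z == w2[p2])).length)
                (p2 + ((w2.drop p2).takeWhile (fun z => z == w2[p2])).length) acc (by omega),
            drop_past_takeWhile, drop_past_takeWhile]
          congr 1
          rw [filter_split (fun c => !((w2.drop p2).contains c)) (fun z => z == w2[p2])
            (w1.drop p1)]
          have hftu : ((w1.drop p1).takeWhile (fun z => z == w2[p2])).filter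
              (fun c => !((w2.drop p2).contains c)) = [] := by
            rw [List.filter_eq_nil_iff]
            intro c hc
            have hcd : c = w2[p2] := by simpa using List.mem_takeWhile_imp hc
            have hct : (w2.drop p2).contains c = true := by
              rw [List.contains_iff_mem, hcd, hd2]
              exact List.mem_cons_self ..
            simp only [Bool.not_eq_true', Bool.not_eq_false]
            exact hct
          rw [hftu, List.nil_append]
          apply List.filter_congr
          intro c hc
          dsimp only
          have hdc : w2[p2] < c :=
            gt_of_mem_dropWhile_eq (w2[p2]) (w1.drop p1) hu
              (fun z hz => by rw [← heq]; exact forall_head_le w1 p1 hp1 hu z hz) c hc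
          rw [contains_dropWhile_eq _ _ _ (fun z hz => by
            have hzd : z = w2[p2] := by simpa using List.mem_takeWhile_imp hz
            exact hzd ▸ ne_of_lt hdc)]
    · rw [if_neg hg]
      by_cases hp1 : p1 < w1.length
      · have hl2 : w2.length ≤ p2 := by
          by_contra hcon
          exact hg ⟨hp1, by omega⟩
        rw [if_pos hp1, List.drop_eq_nil_of_le hl2]
        simp
      · rw [if_neg hp1, List.drop_eq_nil_of_le (Nat.le_of_not_lt hp1)]
        simp

theorem deductWords2_aux (word1 word2 : String) :
    deductWords2 word1 word2 = deductWords2_alt word1 word2 := by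
  simp only [deductWords2, deductWords2_alt]
  have hp1 : (PySem.List.sorted word1.toList (fun c => c) false).Pairwise (· ≤ ·) :=
    PySem.List.sorted_pairwise word1.toList (fun c => c)
  have hp2 : (PySem.List.sorted word2.toList (fun c => c) false).Pairwise (· ≤ ·) :=
    PySem.List.sorted_pairwise word2.toList (fun c => c)
  rw [aOuter_filter _ _ hp1 hp2
    ((PySem.List.sorted word1.toList (fun c => c) false).length +
     (PySem.List.sorted word2.toList (fun c => c) false).length + 1) 0 0 [] (by omega)]
  simp only [List.drop_zero, List.nil_append]
  congr 1
  have hQ : word1.toList.filter (fun c => !(PySem.Set.contains (PySem.Set.ofList word2.toList) c)) =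
      word1.toList.filter (fun c => !((PySem.List.sorted word2.toList (fun c => c) false).contains c)) := by
    apply List.filter_congr
    intro c _
    rw [contains_sorted_eq_contains_ofList]
  rw [hQ]
  symm
  apply PySem.List.sorted_id_eq_of_perm_of_pairwise
  · exact (PySem.List.sorted_perm word1.toList (fun c => c) false).filter _
  · exact hp1.filter _

-- ===== VERDICT (by name: the statement is the Claim_ definition above) =====
theorem deductWords2_spec : Claim_equal_deductWords2 := by
  intro word1 word2 _
  unfold Spec_deductWords2
  exact deductWords2_aux word1 word2
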